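-- pv_equiv track=rewrite | github.com/ktavabi/training | sessions/pyea/reference_code.py | score_robot
-- ===== SOURCE A (Python) =====
-- def score_robot(robot, room):
--     """Given a room and a cleaning robot, score the cleaning of the robot.
--
--     The robot is a list of Directions.
--     The room is a 2D array with dimensions height x width.
--     """
--
--     score = 0
--     width = len(room[0])
--     height = len(room)
--     posx, posy = width//2, height//2
--
--     # Create a deep copy of the room in case we need the original room
--     room_copy = [[val for val in row] for row in room]
--
--     for dx, dy in robot:
--         score += room_copy[posy][posx]
--         room_copy[posy][posx] = 0
--         posx = max(min(posx + dx, width - 1), 0)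
--         posy = max(min(posy + dy, height - 1), 0)
--     score += room_copy[posy][posx]
--     room_copy[posy][posx] = 0
--
--     return score
-- ===== SOURCE B (Python) =====
-- def score_robot(robot, room):
--     """Given a room and a cleaning robot, score the cleaning of the robot.
--
--     Two phases: trace the clamped path into a plain list of positions,
--     then score the distinct visited cells of the untouched room.
--     """
--     ncols = len(room[0])
--     nrows = len(room)
--     x, y = ncols // 2, nrows // 2
--     path = [(x, y)]
--     for dx, dy in robot:
--         x = min(max(x + dx, 0), ncols - 1)
--         y = min(max(y + dy, 0), nrows - 1)
--         path.append((x, y))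
--     return sum(room[cy][cx] for cx, cy in set(path))
-- ===== Notes on version B (the rewrite author's own statement) =====
-- stated objective: simpler
-- what changed: B replaces A's interleaved accumulate-and-zero loop over a mutated deep copy of the room by two separate phases: the loop only traces the clamped path into a plain position list (no score, no grid), and a second pass sums the untouched room over the distinct visited cells; dropping the deep copy and per-step grid writes gives a constant-factor speedup.
-- outside the precondition, e.g. on score_robot([(2, 0)], [[], [2, 2], [0, 8616], [0, 10]]): A returns 0, B returns 8616; on score_robot([], [[1, 2, 3], [9, 9, 9], [3]]): A returns 9, B returns 9; on score_robot([], [[1, 2], [3]]): A raises IndexError, B raises IndexError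
import Mathlib
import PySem

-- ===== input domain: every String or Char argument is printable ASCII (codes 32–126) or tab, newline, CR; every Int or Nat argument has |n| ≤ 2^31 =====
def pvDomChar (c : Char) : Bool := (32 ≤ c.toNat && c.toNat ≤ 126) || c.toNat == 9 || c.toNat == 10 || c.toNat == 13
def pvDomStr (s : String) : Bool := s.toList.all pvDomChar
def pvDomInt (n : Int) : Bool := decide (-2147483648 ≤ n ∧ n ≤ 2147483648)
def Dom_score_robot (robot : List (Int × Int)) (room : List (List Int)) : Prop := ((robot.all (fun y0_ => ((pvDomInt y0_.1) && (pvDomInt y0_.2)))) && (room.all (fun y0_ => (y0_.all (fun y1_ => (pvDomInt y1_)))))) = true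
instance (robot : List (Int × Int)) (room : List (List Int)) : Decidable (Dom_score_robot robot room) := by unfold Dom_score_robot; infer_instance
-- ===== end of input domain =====

-- B splits A's interleaved accumulate-and-zero loop over a mutated room copy into two phases:
-- trace the clamped path into a plain position list, then sum the untouched room over the
-- distinct visited cells (objective: simpler).

-- ===== PORT A =====
-- loop body of A's for-loop: read the cell, zero it in the copy, clamp-move
def stepA (width height : Int) (st : Int × List (List Int) × Int × Int) (d : Int × Int) :
    Int × List (List Int) × Int × Int :=
  let score := st.1 + PySem.List.pyGetD (PySem.List.pyGetD st.2.1 st.2.2.2 []) st.2.2.1 0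
  let rc := PySem.List.pySetD st.2.1 st.2.2.2
      (PySem.List.pySetD (PySem.List.pyGetD st.2.1 st.2.2.2 []) st.2.2.1 0)
  let px := max (min (st.2.2.1 + d.1) (width - 1)) 0
  let py := max (min (st.2.2.2 + d.2) (height - 1)) 0
  (score, rc, px, py)

def score_robot (robot : List (Int × Int)) (room : List (List Int)) : Int :=
  let width : Int := ((PySem.List.pyGetD room 0 []).length : Int)
  let height : Int := (room.length : Int)
  let posx : Int := PySem.Int.floordiv width 2
  let posy : Int := PySem.Int.floordiv height 2
  let room_copy : List (List Int) := room.map (fun row => row.map (fun val => val))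
  let st := robot.foldl (stepA width height) (0, room_copy, posx, posy)
  st.1 + PySem.List.pyGetD (PySem.List.pyGetD st.2.1 st.2.2.2 []) st.2.2.1 0

-- ===== PORT B =====
-- one trace step of B: no grid, no score — just clamp-move and extend the path list
def traceStep (ncols nrows : Int) :
    List (Int × Int) × Int × Int → Int × Int → List (Int × Int) × Int × Int
  | (path, x, y), (dx, dy) =>
    let nx := min (max (x + dx) 0) (ncols - 1)
    let ny := min (max (y + dy) 0) (nrows - 1)
    (path ++ [(nx, ny)], nx, ny)

def score_robot_alt (robot : List (Int × Int)) (room : List (List Int)) : Int :=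
  let ncols : Int := (room.headI.length : Int)
  let nrows : Int := (room.length : Int)
  let tr := robot.foldl (traceStep ncols nrows)
      ([(PySem.Int.floordiv ncols 2, PySem.Int.floordiv nrows 2)],
       PySem.Int.floordiv ncols 2, PySem.Int.floordiv nrows 2)
  ((PySem.Set.ofList tr.1).map
      (fun c => PySem.List.pyGetD (PySem.List.pyGetD room c.2 []) c.1 0)).sum

-- ===== PRECONDITION & SPEC =====
-- Pre_ restricts to the rooms the docstring stipulates (a height×width 2D array, both positive —
-- every row at least as long as the first): it excludes empty rooms, rooms whose first row is empty,
-- and ragged rooms with a row shorter than the first row, on which A raises IndexError for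
-- path-dependent inputs that no closed-form condition can separate from the accidental returns
-- (where such a room does let A return, B returns the same value).
def Pre_score_robot (robot : List (Int × Int)) (room : List (List Int)) : Prop :=
  room ≠ [] ∧ 0 < (room.headD []).length ∧ ∀ row ∈ room, (room.headD []).length ≤ row.length
instance (robot : List (Int × Int)) (room : List (List Int)) : Decidable (Pre_score_robot robot room) := by unfold Pre_score_robot; infer_instance

def pvWitness_score_robot : (List (Int × Int)) × List (List Int) :=
  ([(1, 0), (0, 1), (-1, 0)], [[1, 2], [3, 4]])

def Spec_score_robot (robot : List (Int × Int)) (room : List (List Int)) (out : Int) : Prop := out = score_robot_alt robot room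
instance (robot : List (Int × Int)) (room : List (List Int)) (out : Int) : Decidable (Spec_score_robot robot room out) := by unfold Spec_score_robot; infer_instance

-- ===== CLAIM (what is proved, stated in full; the proofs are below) =====
def Claim_equal_score_robot : Prop := ∀ (robot : List (Int × Int)) (room : List (List Int)), Dom_score_robot robot room → Pre_score_robot robot room → Spec_score_robot robot room (score_robot robot room)

-- ===== LEMMAS AND PROOFS =====

-- value of the (x,y) cell of a grid, exactly as both ports read it
def valR (g : List (List Int)) (p : Int × Int) : Int :=
  PySem.List.pyGetD (PySem.List.pyGetD g p.2 []) p.1 0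

-- position inside the width×height grid
def inR (w h : Int) (p : Int × Int) : Prop := 0 ≤ p.1 ∧ p.1 < w ∧ 0 ≤ p.2 ∧ p.2 < h

-- A's final read, after folding A's loop body over the moves
def finA (w h : Int) (robot : List (Int × Int)) (score : Int) (g : List (List Int))
    (x y : Int) : Int :=
  let st := robot.foldl (stepA w h) (score, g, x, y)
  st.1 + PySem.List.pyGetD (PySem.List.pyGetD st.2.1 st.2.2.2 []) st.2.2.1 0

-- the clamped path STARTING AFTER position (x,y), written with A's clamp
def pathA (w h x y : Int) : List (Int × Int) → List (Int × Int)
  | [] => []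
  | d :: rest =>
    let nx := max (min (x + d.1) (w - 1)) 0
    let ny := max (min (y + d.2) (h - 1)) 0
    (nx, ny) :: pathA w h nx ny rest

-- first-visit sum along a path, relative to an already-visited set V
def gAux (room : List (List Int)) : List (Int × Int) → List (Int × Int) → Int
  | _, [] => 0
  | V, p :: ps => (if p ∈ V then 0 else valR room p) + gAux room (PySem.Set.add V p) ps

theorem getD_setD_int {α : Type} (xs : List α) (i j : Int) (v d : α)
    (h0 : 0 ≤ i) (hi : i < (xs.length : Int)) (hj : 0 ≤ j) :
    PySem.List.pyGetD (PySem.List.pySetD xs i v) j d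
      = if j = i then v else PySem.List.pyGetD xs j d := by
  have hget : ∀ (ys : List α), PySem.List.pyGetD ys j d = ys.getD j.toNat d := fun ys => by
    rw [← Int.toNat_of_nonneg hj, PySem.List.pyGetD_natCast]
    simp only [List.getD_eq_getElem?_getD]
    rw [show (((j.toNat : Int)).toNat) = j.toNat by omega]
  rw [PySem.List.pySetD_of_nonneg xs v h0, hget, hget,
      List.getD_eq_getElem?_getD, List.getD_eq_getElem?_getD, List.getElem?_set]
  by_cases hij : j = i
  · subst hij
    simp [show j.toNat < xs.length by omega]
  · have hne : i.toNat ≠ j.toNat := by omega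
    simp [hne, hij]

-- reading the grid after A zeroes cell p: zero there, unchanged elsewhere
theorem valR_zero (g : List (List Int)) (p q : Int × Int)
    (hy0 : 0 ≤ p.2) (hy : p.2 < (g.length : Int))
    (hx0 : 0 ≤ p.1) (hx : p.1 < ((PySem.List.pyGetD g p.2 []).length : Int))
    (hq1 : 0 ≤ q.1) (hq2 : 0 ≤ q.2) :
    valR (PySem.List.pySetD g p.2 (PySem.List.pySetD (PySem.List.pyGetD g p.2 []) p.1 0)) q
      = if q = p then 0 else valR g q := by
  unfold valR
  rw [getD_setD_int g p.2 q.2 _ [] hy0 hy hq2]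
  by_cases hyy : q.2 = p.2
  · rw [if_pos hyy, hyy, getD_setD_int _ p.1 q.1 0 0 hx0 hx hq1]
    by_cases hxx : q.1 = p.1
    · have hqp : q = p := by cases q; cases p; simp_all
      simp [hqp]
    · have hqp : q ≠ p := fun hq => hxx (congrArg Prod.fst hq)
      simp [hxx, hqp]
  · have hqp : q ≠ p := fun hq => hyy (congrArg Prod.snd hq)
    rw [if_neg hyy, if_neg hqp]

-- summing a value over Set.add: one new summand exactly when the element is new
theorem sum_map_set_add (V : List (Int × Int)) (p : Int × Int) (f : Int × Int → Int) :
    ((PySem.Set.add V p).map f).sum = (V.map f).sum + (if p ∈ V then 0 else f p) := by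
  by_cases hp : p ∈ V
  · simp [PySem.Set.add, hp]
  · simp [PySem.Set.add, hp]

-- B's trace fold only appends the clamped path to the accumulated list
theorem foldl_traceStep (w h : Int) (hw : 0 < w) (hh : 0 < h) :
    ∀ (robot P : List (Int × Int)) (x y : Int),
      (robot.foldl (traceStep w h) (P, x, y)).1 = P ++ pathA w h x y robot := by
  intro robot
  induction robot with
  | nil => intro P x y; simp [pathA]
  | cons d rest ih =>
    intro P x y
    obtain ⟨dx, dy⟩ := d
    have hx : min (max (x + dx) 0) (w - 1) = max (min (x + dx) (w - 1)) 0 := by omega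
    have hy : min (max (y + dy) 0) (h - 1) = max (min (y + dy) (h - 1)) 0 := by omega
    show (rest.foldl (traceStep w h)
        (P ++ [(min (max (x + dx) 0) (w - 1), min (max (y + dy) 0) (h - 1))],
         min (max (x + dx) 0) (w - 1), min (max (y + dy) 0) (h - 1))).1
      = P ++ pathA w h x y ((dx, dy) :: rest)
    rw [hx, hy, ih]
    simp [pathA]

-- summing over a fold of Set.add = the set's sum plus the first-visit sum of the path
theorem sum_foldl_add (room : List (List Int)) :
    ∀ (path S : List (Int × Int)),
      ((path.foldl PySem.Set.add S).map (valR room)).sum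
        = (S.map (valR room)).sum + gAux room S path := by
  intro path
  induction path with
  | nil => intro S; simp [gAux]
  | cons p ps ih =>
    intro S
    show ((ps.foldl PySem.Set.add (PySem.Set.add S p)).map (valR room)).sum
      = (S.map (valR room)).sum + gAux room S (p :: ps)
    rw [ih, sum_map_set_add]
    simp [gAux]
    ring

-- the main invariant: A's interleaved loop, started on the room with the cells of V already
-- zeroed, adds exactly the first-visit sum of the remaining path (relative to V)
theorem main_inv (room : List (List Int)) (w h : Int) (hw : 0 < w) (hh : 0 < h)
    (hhdef : h = (room.length : Int))
    (hrow : ∀ (y : Int), 0 ≤ y → y < h → w ≤ ((PySem.List.pyGetD room y []).length : Int)) :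
    ∀ (robot V : List (Int × Int)) (x y score : Int) (g : List (List Int)),
      (∀ q ∈ V, inR w h q) → inR w h (x, y) →
      g.length = room.length →
      (∀ (z : Int), 0 ≤ z → z < h →
        (PySem.List.pyGetD g z []).length = (PySem.List.pyGetD room z []).length) →
      (∀ q, inR w h q → valR g q = if q ∈ V then 0 else valR room q) →
      finA w h robot score g x y
        = score + gAux room V ((x, y) :: pathA w h x y robot) := by
  intro robot
  induction robot with
  | nil =>
    intro V x y score g hV hp hlen hrows hg
    have hval : valR g (x, y) = if (x, y) ∈ V then 0 else valR room (x, y) := hg (x, y) hp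
    have hfin : finA w h [] score g x y = score + valR g (x, y) := rfl
    rw [hfin, hval]
    simp [pathA, gAux]
  | cons d rest ih =>
    intro V x y score g hV hp hlen hrows hg
    obtain ⟨hp1, hp2, hp3, hp4⟩ := hp
    have hglen : (g.length : Int) = h := by rw [hlen, hhdef]
    have hylt : y < (g.length : Int) := by omega
    have hrowp : x < ((PySem.List.pyGetD g y []).length : Int) := by
      have h1 := hrows y hp3 hp4
      have h2 := hrow y hp3 hp4
      omega
    set px := max (min (x + d.1) (w - 1)) 0 with hpx
    set py := max (min (y + d.2) (h - 1)) 0 with hpy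
    have hp' : inR w h (px, py) := by
      refine ⟨?_, ?_, ?_, ?_⟩ <;> simp only [hpx, hpy] <;> omega
    set g' := PySem.List.pySetD g y (PySem.List.pySetD (PySem.List.pyGetD g y []) x 0) with hg'
    have step_red : finA w h (d :: rest) score g x y
        = finA w h rest (score + valR g (x, y)) g' px py := rfl
    have hV' : ∀ q ∈ PySem.Set.add V (x, y), inR w h q := by
      intro q hq
      rcases (PySem.Set.mem_add V (x, y) q).mp hq with hqv | hqe
      · exact hV q hqv
      · rw [hqe]; exact ⟨hp1, hp2, hp3, hp4⟩
    have hlen' : g'.length = room.length := by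
      rw [hg', PySem.List.length_pySetD]; exact hlen
    have hrows' : ∀ (z : Int), 0 ≤ z → z < h →
        (PySem.List.pyGetD g' z []).length = (PySem.List.pyGetD room z []).length := by
      intro z h0 h1
      rw [hg', getD_setD_int g y z _ [] hp3 hylt h0]
      by_cases hzz : z = y
      · rw [if_pos hzz, PySem.List.length_pySetD, hzz]; exact hrows y hp3 hp4
      · rw [if_neg hzz]; exact hrows z h0 h1
    have hg'' : ∀ q, inR w h q →
        valR g' q = if q ∈ PySem.Set.add V (x, y) then 0 else valR room q := by
      intro q hq
      rw [hg', valR_zero g (x, y) q hp3 hylt hp1 hrowp hq.1 hq.2.2.1]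
      by_cases hqp : q = (x, y)
      · rw [if_pos hqp, if_pos ((PySem.Set.mem_add V (x, y) q).mpr (Or.inr hqp))]
      · rw [if_neg hqp, hg q hq]
        have hiff : (q ∈ PySem.Set.add V (x, y)) ↔ q ∈ V := by
          rw [PySem.Set.mem_add]; simp [hqp]
        by_cases hqv : q ∈ V
        · rw [if_pos hqv, if_pos (hiff.mpr hqv)]
        · rw [if_neg hqv, if_neg (fun hc => hqv (hiff.mp hc))]
    have ihh := ih (PySem.Set.add V (x, y)) px py (score + valR g (x, y)) g'
      hV' hp' hlen' hrows' hg''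
    have hpath : pathA w h x y (d :: rest) = (px, py) :: pathA w h px py rest := rfl
    rw [step_red, ihh, hpath]
    have hval : valR g (x, y) = if (x, y) ∈ V then 0 else valR room (x, y) :=
      hg (x, y) ⟨hp1, hp2, hp3, hp4⟩
    rw [hval]
    show score + (if (x, y) ∈ V then 0 else valR room (x, y))
        + gAux room (PySem.Set.add V (x, y)) ((px, py) :: pathA w h px py rest)
      = score + gAux room V ((x, y) :: (px, py) :: pathA w h px py rest)
    simp [gAux]
    ring

-- ===== VERDICT (by name: the statement is the Claim_ definition above) =====
theorem score_robot_spec : Claim_equal_score_robot := by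
  unfold Claim_equal_score_robot
  intro robot room _ hpre
  unfold Spec_score_robot
  obtain ⟨hne, hhead, hrows⟩ := hpre
  set w : Int := ((PySem.List.pyGetD room 0 []).length : Int) with hwdef
  set h : Int := ((room.length : Nat) : Int) with hhdef
  have hgetzero : PySem.List.pyGetD room 0 [] = room.headD [] := by
    rw [PySem.List.pyGetD_zero]; cases room <;> simp
  have hheadI : room.headI = room.headD [] := by cases room <;> rfl
  have hw : 0 < w := by
    rw [hwdef, hgetzero]; exact_mod_cast hhead
  have hh : 0 < h := by
    rw [hhdef]
    exact_mod_cast List.length_pos_of_ne_nil hne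
  have hrow : ∀ (z : Int), 0 ≤ z → z < h →
      w ≤ ((PySem.List.pyGetD room z []).length : Int) := by
    intro z h0 h1
    have hmem : PySem.List.pyGetD room z [] ∈ room := by
      apply PySem.List.pyGetD_mem
      simp only [PySem.Raise.InRange]
      omega
    have hle := hrows _ hmem
    rw [hwdef, hgetzero]
    exact_mod_cast hle
  set x0 : Int := PySem.Int.floordiv w 2 with hx0def
  set y0 : Int := PySem.Int.floordiv h 2 with hy0def
  have hx0 : x0 = w / 2 := PySem.Int.floordiv_eq_ediv_of_pos (by norm_num)
  have hy0 : y0 = h / 2 := PySem.Int.floordiv_eq_ediv_of_pos (by norm_num)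
  have hp0 : inR w h (x0, y0) := by
    refine ⟨?_, ?_, ?_, ?_⟩ <;> simp only [hx0, hy0] <;> omega
  have hcopy : room.map (fun row => row.map (fun val => val)) = room := by simp
  have hA : score_robot robot room
      = finA w h robot 0 (room.map (fun row => row.map (fun val => val))) x0 y0 := rfl
  have hwB : ((room.headI.length : Nat) : Int) = w := by
    rw [hwdef, hgetzero, hheadI]
  have hB : score_robot_alt robot room
      = (((robot.foldl (traceStep w h) ([(x0, y0)], x0, y0)).1.foldl
            PySem.Set.add []).map (valR room)).sum := by
    show (((robot.foldl (traceStep ((room.headI.length : Nat) : Int) ((room.length : Nat) : Int))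
        ([(PySem.Int.floordiv ((room.headI.length : Nat) : Int) 2,
           PySem.Int.floordiv ((room.length : Nat) : Int) 2)],
         PySem.Int.floordiv ((room.headI.length : Nat) : Int) 2,
         PySem.Int.floordiv ((room.length : Nat) : Int) 2)).1.foldl
        PySem.Set.add []).map (valR room)).sum = _
    rw [hwB]
  rw [hA, hcopy, hB, foldl_traceStep w h hw hh robot [(x0, y0)] x0 y0,
      main_inv room w h hw hh hhdef hrow robot [] x0 y0 0 room
        (by simp) hp0 rfl (fun z _ _ => rfl) (by intro q _; simp),
      sum_foldl_add room]
  simp [gAux]
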